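-- pv_equiv track=rewrite | github.com/AlexandreRiedo/usaco-bronze | basic-complete-search/usaco-cowcheckups.py | get_expansion_tuples
-- ===== SOURCE A (Python) =====
-- def get_expansion_tuples(values, index, offset):
--     left = index
--     right = index + offset
--     tuples_found = [(left - 1, right - 1)]
--     expansion = 0
--     while left - expansion > 1 and right + expansion <= len(values) - 1:
--         expansion += 1
--         tuples_found.append((left - 1 - expansion, right - 1 + expansion))
--     return tuples_found
-- ===== SOURCE B (Python) =====
-- def get_expansion_tuples(values, index, offset):
--     left = index - 1
--     right = index + offset - 1
--     upper = max(0, min(index - 2, len(values) - 1 - index - offset) + 1)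
--     return [(left - e, right + e) for e in range(upper + 1)]
-- ===== Notes on version B (the rewrite author's own statement) =====
-- stated objective: simpler
-- what changed: Replaces the boundary-checked while loop with mutable expansion state by an analytically derived iteration bound (a clamped min of the two boundary distances) and a single range comprehension producing all tuples at once.
import Mathlib
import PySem

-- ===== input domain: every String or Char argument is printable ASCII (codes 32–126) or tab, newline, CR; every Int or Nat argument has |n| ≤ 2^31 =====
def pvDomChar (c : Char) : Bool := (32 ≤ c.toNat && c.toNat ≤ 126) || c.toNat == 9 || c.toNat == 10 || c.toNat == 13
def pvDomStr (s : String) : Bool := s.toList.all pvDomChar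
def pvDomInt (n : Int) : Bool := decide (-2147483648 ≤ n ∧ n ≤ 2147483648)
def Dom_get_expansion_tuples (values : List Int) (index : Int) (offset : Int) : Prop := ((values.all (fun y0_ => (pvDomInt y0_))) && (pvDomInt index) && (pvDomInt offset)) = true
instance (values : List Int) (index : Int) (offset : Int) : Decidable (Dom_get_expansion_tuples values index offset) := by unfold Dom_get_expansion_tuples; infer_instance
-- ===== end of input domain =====

-- B replaces A's boundary-checked while loop by an analytically computed iteration
-- bound and a single range comprehension (objective: simpler/closed-form; same cost class).

-- ===== PORT A =====
-- the while loop of A: state = (expansion, accumulated list)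
-- fuel is only a totality guard: it starts at (left - 1 - expansion).toNat, which the
-- guard keeps positive, so the 0-fuel branch is never reached.
def pvLoopA (n left right : Int) (fuel : Nat) (expansion : Int) (acc : List (Int × Int)) : List (Int × Int) :=
  if 1 < left - expansion ∧ right + expansion ≤ n - 1 then
    match fuel with
    | 0 => acc
    | f + 1 => pvLoopA n left right f (expansion + 1)
        (acc ++ [(left - 1 - (expansion + 1), right - 1 + (expansion + 1))])
  else acc

def get_expansion_tuples (values : List Int) (index : Int) (offset : Int) : List (Int × Int) :=
  let left := index
  let right := index + offset
  pvLoopA (values.length : Int) left right (left - 1).toNat 0 [(left - 1, right - 1)]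

-- ===== PORT B =====
def get_expansion_tuples_alt (values : List Int) (index : Int) (offset : Int) : List (Int × Int) :=
  let left := index - 1
  let right := index + offset - 1
  let upper := max 0 (min (index - 2) ((values.length : Int) - 1 - index - offset) + 1)
  (PySem.List.pyRange 0 (upper + 1) 1).map (fun e => (left - e, right + e))

-- ===== PRECONDITION & SPEC =====
def Spec_get_expansion_tuples (values : List Int) (index : Int) (offset : Int) (out : List (Int × Int)) : Prop := out = get_expansion_tuples_alt values index offset
instance (values : List Int) (index : Int) (offset : Int) (out : List (Int × Int)) : Decidable (Spec_get_expansion_tuples values index offset out) := by unfold Spec_get_expansion_tuples; infer_instance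

-- ===== CLAIM (what is proved, stated in full; the proofs are below) =====
def Claim_equal_get_expansion_tuples : Prop := ∀ (values : List Int) (index : Int) (offset : Int), Dom_get_expansion_tuples values index offset → Spec_get_expansion_tuples values index offset (get_expansion_tuples values index offset)

-- ===== LEMMAS AND PROOFS =====

-- The loop, started at `expansion = ex`, appends exactly the tuples for
-- e = ex+1 … min(left-2, n-1-right)+1 to the accumulator.
theorem pvLoopA_eq (n left right : Int) : ∀ (k : Nat) (ex : Int) (acc : List (Int × Int)),
    (left - 1 - ex).toNat = k →
    pvLoopA n left right k ex acc =
      acc ++ (PySem.List.pyRange (ex + 1) (min (left - 2) (n - 1 - right) + 2) 1).map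
        (fun e => (left - 1 - e, right - 1 + e)) := by
  intro k
  induction k with
  | zero =>
    intro ex acc hk
    unfold pvLoopA
    rw [if_neg (by omega)]
    rw [PySem.List.pyRange_one_eq_nil (by omega)]
    simp
  | succ k ih =>
    intro ex acc hk
    unfold pvLoopA
    by_cases h : 1 < left - ex ∧ right + ex ≤ n - 1
    · rw [if_pos h]
      simp only
      rw [ih (ex + 1) _ (by omega)]
      rw [PySem.List.pyRange_one_cons (a := ex + 1) (by omega)]
      simp
    · rw [if_neg h]
      rw [PySem.List.pyRange_one_eq_nil (by omega)]
      simp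

-- ===== VERDICT (by name: the statement is the Claim_ definition above) =====
theorem get_expansion_tuples_spec : Claim_equal_get_expansion_tuples := by
  unfold Claim_equal_get_expansion_tuples Spec_get_expansion_tuples
  intro values index offset _
  unfold get_expansion_tuples get_expansion_tuples_alt
  simp only
  rw [pvLoopA_eq (values.length : Int) index (index + offset) (index - 1).toNat 0 _ (by omega)]
  set n : Int := (values.length : Int)
  set m : Int := min (index - 2) (n - 1 - index - offset) with hm
  have hmin : min (index - 2) (n - 1 - (index + offset)) = m := by omega
  rw [hmin]
  have hU : max 0 (m + 1) + 1 = max 1 (m + 2) := by omega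
  rw [hU]
  rw [PySem.List.pyRange_one_cons (a := 0) (by omega)]
  simp only [List.map_cons, zero_add]
  by_cases hc : 1 ≤ m + 2
  · rw [max_eq_right (by omega)]
    simp
  · rw [max_eq_left (by omega)]
    rw [PySem.List.pyRange_one_eq_nil (a := 1) (b := 1) (by omega),
        PySem.List.pyRange_one_eq_nil (a := 1) (by omega)]
    simp
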